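-- pv_equiv track=rewrite | github.com/dbeltra/advent-of-code-2020 | day6/solution.py | find_solution_2
-- ===== SOURCE A (Python) =====
-- def find_solution_2(data):
--     result = 0
--     for answer_group in data:
--         for idx, person_answer in enumerate(answer_group.split(' ')):
--             if idx > 0:
--                 common_yes = set(person_answer).intersection(common_yes)
--             else:
--                 common_yes = set(person_answer)
--         result += len(list(common_yes))
--     return result
-- ===== SOURCE B (Python) =====
-- def find_solution_2(data):
--     # Frequency counting instead of a running set intersection: a character is
--     # common to the whole group iff its per-person (distinct) occurrences equal
--     # the number of persons.  (The set iterations below only feed order-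
--     # independent consumers: count and a sum.)
--     result = 0
--     for group in data:
--         persons = group.split(' ')
--         pool = [c for person in persons for c in set(person)]
--         result += sum(1 for c in set(pool) if pool.count(c) == len(persons))
--     return result
-- ===== Notes on version B (the rewrite author's own statement) =====
-- stated objective: alternative
-- what changed: Replaces the enumerate-indexed running set intersection with a frequency count: pool the distinct characters of each person and count those whose multiplicity equals the number of persons.
import Mathlib
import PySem

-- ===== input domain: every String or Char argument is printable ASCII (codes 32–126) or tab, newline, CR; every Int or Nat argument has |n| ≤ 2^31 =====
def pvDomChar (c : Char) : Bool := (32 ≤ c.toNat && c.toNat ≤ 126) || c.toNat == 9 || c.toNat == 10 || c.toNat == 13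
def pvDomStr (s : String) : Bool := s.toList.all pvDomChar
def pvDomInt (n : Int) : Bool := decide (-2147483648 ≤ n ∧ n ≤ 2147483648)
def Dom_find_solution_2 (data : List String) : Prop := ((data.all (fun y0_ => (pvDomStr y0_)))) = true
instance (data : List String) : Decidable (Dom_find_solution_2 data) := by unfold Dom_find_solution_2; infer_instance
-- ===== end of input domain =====

-- B replaces A's enumerate-indexed running set intersection by a per-group frequency count of
-- distinct-per-person characters (objective: alternative).  Python's set iterations in B are
-- consumed only order-independently (count / a sum), so the port is exact.

-- ===== PORT A =====
-- A's inner loop: 'for idx, person_answer in enumerate(answer_group.split(' ')): …'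
def pvInterLoop (parts : List (List Char)) : PySem.Set Char :=
  (PySem.List.enumerate parts).foldl
    (fun common_yes ip =>
      if ip.1 > 0 then (PySem.Set.ofList ip.2).inter common_yes
      else PySem.Set.ofList ip.2)
    PySem.Set.empty   -- never used: split(' ') is nonempty, so idx 0 always overwrites it

def find_solution_2 (data : List String) : Int :=
  data.foldl
    (fun result answer_group =>
      result + PySem.Set.len (pvInterLoop (PySem.Chars.splitOn answer_group.toList [' '])))
    0

-- ===== PORT B =====
-- pool = [c for person in persons for c in set(person)]
def pvPool (persons : List (List Char)) : List Char :=
  persons.flatMap (fun p => PySem.Set.ofList p)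

def find_solution_2_alt (data : List String) : Int :=
  data.foldl
    (fun result group =>
      let persons := PySem.Chars.splitOn group.toList [' ']
      let pool := pvPool persons
      result + (((PySem.Set.ofList pool).filter (fun c => pool.count c == persons.length)).length : Int))
    0

-- ===== PRECONDITION & SPEC =====
def Spec_find_solution_2 (data : List String) (out : Int) : Prop := out = find_solution_2_alt data
instance (data : List String) (out : Int) : Decidable (Spec_find_solution_2 data out) := by unfold Spec_find_solution_2; infer_instance

-- ===== CLAIM (what is proved, stated in full; the proofs are below) =====
def Claim_equal_find_solution_2 : Prop := ∀ (data : List String), Dom_find_solution_2 data → Spec_find_solution_2 data (find_solution_2 data)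

-- ===== LEMMAS AND PROOFS =====

-- split(' ') never returns the empty list
lemma splitOn_go_ne_nil (sep : List Char) (fuel : Nat) (l cur : List Char) (acc : List (List Char)) :
    PySem.Chars.splitOn.go sep fuel l cur acc ≠ [] := by
  induction fuel generalizing l cur acc with
  | zero => rw [PySem.Chars.splitOn.go]; simp
  | succ n ih =>
    cases l with
    | nil => rw [PySem.Chars.splitOn.go]; simp; omega
    | cons c rest =>
      rw [PySem.Chars.splitOn.go]
      split
      · exact ih _ _ _
      · exact ih _ _ _

lemma splitOn_ne_nil (s : List Char) : PySem.Chars.splitOn s [' '] ≠ [] := by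
  unfold PySem.Chars.splitOn; exact splitOn_go_ne_nil _ _ _ _ _

-- A's inner loop after the idx = 0 step is a plain fold of intersections
lemma interLoop_tail (ps : List (List Char)) :
    ∀ (s : Int) (acc : PySem.Set Char), 1 ≤ s →
      (PySem.List.enumerate ps s).foldl
        (fun common_yes ip =>
          if ip.1 > 0 then (PySem.Set.ofList ip.2).inter common_yes
          else PySem.Set.ofList ip.2) acc
      = ps.foldl (fun a q => (PySem.Set.ofList q).inter a) acc := by
  induction ps with
  | nil => intro s acc _; simp [PySem.List.enumerate]
  | cons q qs ih =>
    intro s acc hs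
    rw [PySem.List.enumerate_cons]
    simp only [List.foldl_cons]
    rw [if_pos (by omega : (s : Int) > 0), ih (s+1) _ (by omega)]

lemma interLoop_cons (p : List Char) (ps : List (List Char)) :
    pvInterLoop (p :: ps) = ps.foldl (fun a q => (PySem.Set.ofList q).inter a) (PySem.Set.ofList p) := by
  unfold pvInterLoop
  rw [PySem.List.enumerate_cons]
  simp only [List.foldl_cons]
  rw [if_neg (by omega : ¬ ((0:Int) > 0))]
  rw [interLoop_tail ps (0+1) _ (by omega)]

lemma mem_interFold (ps : List (List Char)) :
    ∀ (acc : PySem.Set Char) (c : Char),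
      c ∈ ps.foldl (fun a q => (PySem.Set.ofList q).inter a) acc ↔ c ∈ acc ∧ ∀ q ∈ ps, c ∈ q := by
  induction ps with
  | nil => simp
  | cons q qs ih =>
    intro acc c
    simp only [List.foldl_cons, ih, PySem.Set.mem_inter, PySem.Set.mem_ofList, List.mem_cons]
    constructor
    · rintro ⟨⟨h1, h2⟩, h3⟩
      exact ⟨h2, by rintro r (rfl | hr); exact h1; exact h3 r hr⟩
    · rintro ⟨h2, h3⟩
      exact ⟨⟨h3 q (Or.inl rfl), h2⟩, fun r hr => h3 r (Or.inr hr)⟩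

lemma nodup_interFold (ps : List (List Char)) :
    ∀ (acc : PySem.Set Char), acc.Nodup →
      (ps.foldl (fun a q => (PySem.Set.ofList q).inter a) acc).Nodup := by
  induction ps with
  | nil => intro acc h; exact h
  | cons q qs ih =>
    intro acc _
    exact ih _ (PySem.Set.nodup_inter _ _ (PySem.Set.nodup_ofList _))

-- count of c in a person's distinct-character set
lemma count_ofList (p : List Char) (c : Char) :
    (PySem.Set.ofList p).count c = if c ∈ p then 1 else 0 := by
  by_cases h : c ∈ p
  · rw [if_pos h]
    exact List.count_eq_one_of_mem (PySem.Set.nodup_ofList p) ((PySem.Set.mem_ofList p c).mpr h)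
  · rw [if_neg h]
    exact List.count_eq_zero_of_not_mem (fun hc => h ((PySem.Set.mem_ofList p c).mp hc))

-- count of c in B's pool = number of persons containing c
lemma count_pool (persons : List (List Char)) (c : Char) :
    (pvPool persons).count c = persons.countP (fun p => decide (c ∈ p)) := by
  induction persons with
  | nil => simp [pvPool]
  | cons p ps ih =>
    have hp : pvPool (p :: ps) = PySem.Set.ofList p ++ pvPool ps := by simp [pvPool]
    rw [hp, List.count_append, ih, List.countP_cons, count_ofList]
    by_cases h : c ∈ p <;> simp [h] <;> omega

lemma mem_pool (persons : List (List Char)) (c : Char) :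
    c ∈ pvPool persons ↔ ∃ p ∈ persons, c ∈ p := by
  simp [pvPool, List.mem_flatMap, PySem.Set.mem_ofList]

-- per-group equality of the two ways of computing the common-character count
lemma group_eq (parts : List (List Char)) (h : parts ≠ []) :
    PySem.Set.len (pvInterLoop parts)
      = (((PySem.Set.ofList (pvPool parts)).filter
            (fun c => (pvPool parts).count c == parts.length)).length : Int) := by
  obtain ⟨p, ps, rfl⟩ := List.exists_cons_of_ne_nil h
  rw [interLoop_cons]
  unfold PySem.Set.len
  congr 1
  have hndL : (ps.foldl (fun a q => (PySem.Set.ofList q).inter a) (PySem.Set.ofList p)).Nodup :=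
    nodup_interFold ps _ (PySem.Set.nodup_ofList p)
  have hndR : (((PySem.Set.ofList (pvPool (p :: ps))).filter
      (fun c => (pvPool (p :: ps)).count c == (p :: ps).length))).Nodup :=
    (PySem.Set.nodup_ofList _).filter _
  rw [← List.toFinset_card_of_nodup hndL, ← List.toFinset_card_of_nodup hndR]
  congr 1
  ext c
  simp only [List.mem_toFinset, List.mem_filter, PySem.Set.mem_ofList,
    mem_interFold, PySem.Set.mem_ofList, beq_iff_eq, count_pool, mem_pool]
  constructor
  · rintro ⟨hp, hall⟩
    have hforall : ∀ q ∈ (p :: ps), decide (c ∈ q) = true := by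
      intro q hq
      rcases List.mem_cons.mp hq with h1 | h2
      · subst h1; simpa using hp
      · simpa using hall q h2
    exact ⟨⟨p, List.mem_cons_self, hp⟩, List.countP_eq_length.mpr hforall⟩
  · rintro ⟨-, hcount⟩
    have hforall := List.countP_eq_length.mp hcount
    refine ⟨by simpa using hforall p List.mem_cons_self, fun q hq => by simpa using hforall q (List.mem_cons_of_mem _ hq)⟩

-- both outer loops agree from any accumulator
lemma fold_eq (data : List String) : ∀ (r : Int),
    data.foldl
      (fun result answer_group =>
        result + PySem.Set.len (pvInterLoop (PySem.Chars.splitOn answer_group.toList [' '])))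
      r
    = data.foldl
      (fun result group =>
        let persons := PySem.Chars.splitOn group.toList [' ']
        let pool := pvPool persons
        result + (((PySem.Set.ofList pool).filter (fun c => pool.count c == persons.length)).length : Int))
      r := by
  induction data with
  | nil => intro r; rfl
  | cons g gs ih =>
    intro r
    simp only [List.foldl_cons]
    rw [group_eq _ (splitOn_ne_nil g.toList), ih]

-- ===== VERDICT (by name: the statement is the Claim_ definition above) =====
theorem find_solution_2_spec : Claim_equal_find_solution_2 := by
  intro data _
  unfold Spec_find_solution_2 find_solution_2 find_solution_2_alt
  exact fold_eq data 0
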